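-- pv_equiv track=rewrite | github.com/starodumovski/raft | server.py | find_commitIndex
-- ===== SOURCE A (Python) =====
-- from collections import Counter
--
-- SERVICE_AMOUNT = 0
--
-- def find_commitIndex(list_: list):
--     vals = sorted(Counter(list_).most_common(), key=lambda x: x[0], reverse=True)
--     commitIndex = 0
--     all_sum = 0
--     for tup in vals:
--         all_sum += tup[1]
--         if all_sum >= (SERVICE_AMOUNT - 1) // 2:
--             commitIndex = tup[0]
--             return commitIndex
--     return commitIndex
-- ===== SOURCE B (Python) =====
-- SERVICE_AMOUNT = 0
--
-- def find_commitIndex(list_: list):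
--     # With SERVICE_AMOUNT = 0 the threshold is -1, which the first (largest)
--     # value always reaches: the result is simply the maximum, or 0 when empty.
--     if not list_:
--         return 0
--     m = list_[0]
--     for x in list_[1:]:
--         if x > m:
--             m = x
--     return m
-- ===== Notes on version B (the rewrite author's own statement) =====
-- stated objective: faster
-- what changed: Replaced Counter + two sorts + cumulative-sum scan (whose threshold (SERVICE_AMOUNT-1)//2 = -1 is always met at the first, largest value) by a single linear max pass with 0 for the empty list.
import Mathlib
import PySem

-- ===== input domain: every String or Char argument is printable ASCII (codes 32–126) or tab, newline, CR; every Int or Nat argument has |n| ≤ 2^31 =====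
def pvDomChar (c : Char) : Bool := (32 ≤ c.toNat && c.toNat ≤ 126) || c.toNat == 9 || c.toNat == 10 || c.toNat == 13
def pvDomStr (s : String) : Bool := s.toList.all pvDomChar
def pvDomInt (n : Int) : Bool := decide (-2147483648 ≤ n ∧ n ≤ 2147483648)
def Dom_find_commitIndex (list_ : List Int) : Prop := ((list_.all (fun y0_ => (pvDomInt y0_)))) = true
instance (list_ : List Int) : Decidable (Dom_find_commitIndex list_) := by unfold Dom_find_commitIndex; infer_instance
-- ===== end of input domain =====

-- B replaces Counter + two sorts + a cumulative scan (threshold (0-1)//2 = -1, met at the first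
-- and largest value) by a single linear max pass; objective: faster (asymptotic).


-- ===== PORT A =====
-- the 'for tup in vals' loop of A, carrying all_sum; SERVICE_AMOUNT = 0, so the threshold is (0-1)//2
def findCommitLoop : List (Int × Int) → Int → Int
  | [], _ => 0
  | tup :: rest, allSum =>
    let s := allSum + tup.2
    if PySem.Int.floordiv (0 - 1) 2 ≤ s then tup.1 else findCommitLoop rest s

def find_commitIndex (list_ : List Int) : Int :=
  -- Counter(list_).most_common() = items sorted by count, reverse=True (stable)
  let mc := PySem.List.sorted (PySem.Dict.counter list_).items (fun t => t.2) true
  let vals := PySem.List.sorted mc (fun x => x.1) true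
  findCommitLoop vals 0

-- ===== PORT B =====
-- the 'for x in list_[1:]' loop of B, carrying the running maximum m
def maxLoop : List Int → Int → Int
  | [], m => m
  | x :: xs, m => maxLoop xs (if m < x then x else m)

def find_commitIndex_alt : List Int → Int
  | [] => 0
  | x :: xs => maxLoop xs x

-- ===== PRECONDITION & SPEC =====
def Spec_find_commitIndex (list_ : List Int) (out : Int) : Prop := out = find_commitIndex_alt list_
instance (list_ : List Int) (out : Int) : Decidable (Spec_find_commitIndex list_ out) := by unfold Spec_find_commitIndex; infer_instance

-- ===== CLAIM (what is proved, stated in full; the proofs are below) =====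
def Claim_equal_find_commitIndex : Prop := ∀ (list_ : List Int), Dom_find_commitIndex list_ → Spec_find_commitIndex list_ (find_commitIndex list_)

-- ===== LEMMAS AND PROOFS =====

theorem maxLoop_mem (xs : List Int) (m : Int) : maxLoop xs m = m ∨ maxLoop xs m ∈ xs := by
  induction xs generalizing m with
  | nil => left; rfl
  | cons x xs ih =>
    simp only [maxLoop]
    rcases ih (if m < x then x else m) with h | h
    · rw [h]; split_ifs with hx
      · right; simp
      · left; rfl
    · right; simp [h]

theorem le_maxLoop (xs : List Int) (m : Int) :
    m ≤ maxLoop xs m ∧ ∀ y ∈ xs, y ≤ maxLoop xs m := by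
  induction xs generalizing m with
  | nil => simp [maxLoop]
  | cons x xs ih =>
    simp only [maxLoop]
    rcases ih (if m < x then x else m) with ⟨h1, h2⟩
    refine ⟨?_, ?_⟩
    · refine le_trans ?_ h1; split_ifs with hx <;> omega
    · intro y hy
      rcases List.mem_cons.mp hy with rfl | hy
      · refine le_trans ?_ h1; split_ifs with hx <;> omega
      · exact h2 y hy

theorem find_commitIndex_spec : Claim_equal_find_commitIndex := by
  intro list_ _
  unfold Spec_find_commitIndex find_commitIndex
  cases hl : list_ with
  | nil => decide
  | cons a as =>
    set mc := PySem.List.sorted (PySem.Dict.counter (a :: as)).items (fun t => t.2) true with hmc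
    set vals := PySem.List.sorted mc (fun x : Int × Int => x.1) true with hvals
    -- every element of the original list appears as a key in mc (hence in vals)
    have hkeys : ∀ y ∈ (a :: as), (y, ((a :: as).count y : Int)) ∈ vals := by
      intro y hy
      have : (y, ((a :: as).count y : Int)) ∈ (PySem.Dict.counter (a :: as)).items := by
        rw [PySem.Dict.items_counter]
        exact List.mem_map.mpr ⟨y, (PySem.Set.mem_ofList _ _).mpr hy, rfl⟩
      rw [hvals, PySem.List.mem_sorted, hmc, PySem.List.mem_sorted]
      exact this
    -- vals is nonempty
    have hne : vals ≠ [] := by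
      intro h
      have := hkeys a (by simp)
      rw [h] at this; exact absurd this (List.not_mem_nil)
    cases hv : vals with
    | nil => exact absurd hv hne
    | cons m t =>
      -- m's key bounds all keys
      have hmax : ∀ y ∈ (a :: as), y ≤ m.1 := by
        intro y hy
        have := PySem.List.key_head_sorted_rev_ge (xs := mc) (key := fun x : Int × Int => x.1)
          (by rw [← hvals, hv]) (y, ((a :: as).count y : Int))
          (by have := hkeys y hy; rw [hvals, PySem.List.mem_sorted] at this; exact this)
        exact this
      -- m's count is nonnegative (it is a list count)
      have hm_items : m ∈ (PySem.Dict.counter (a :: as)).items := by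
        have : m ∈ vals := by rw [hv]; simp
        rw [hvals, PySem.List.mem_sorted, hmc, PySem.List.mem_sorted] at this
        exact this
      have hcount : 0 ≤ m.2 := by
        rw [PySem.Dict.items_counter] at hm_items
        rcases List.mem_map.mp hm_items with ⟨k, _, hk⟩
        rw [← hk]; exact Int.natCast_nonneg _
      -- A returns m.1
      have hA : findCommitLoop vals 0 = m.1 := by
        rw [hv]
        simp only [findCommitLoop]
        rw [if_pos]
        have : PySem.Int.floordiv (0 - 1) 2 = -1 := by decide
        rw [this]; omega
      -- m.1 ∈ list (it is a key of the counter)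
      have hmem : m.1 ∈ (a :: as) := by
        rw [PySem.Dict.items_counter] at hm_items
        rcases List.mem_map.mp hm_items with ⟨k, hk, hkeq⟩
        have : m.1 = k := by rw [← hkeq]
        rw [this]
        exact (PySem.Set.mem_ofList _ _).mp hk
      -- B returns the max of the list
      rw [hA]
      simp only [find_commitIndex_alt]
      rcases maxLoop_mem as a with h | h
      · -- maxLoop = a
        rcases le_maxLoop as a with ⟨h1, h2⟩
        have h3 : m.1 ≤ maxLoop as a := by
          rcases List.mem_cons.mp hmem with hma | hma
          · rw [hma]; exact h1
          · exact h2 _ hma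
        have h4 : maxLoop as a ≤ m.1 := by rw [h]; exact hmax a (by simp)
        omega
      · rcases le_maxLoop as a with ⟨h1, h2⟩
        have h3 : m.1 ≤ maxLoop as a := by
          rcases List.mem_cons.mp hmem with hma | hma
          · rw [hma]; exact h1
          · exact h2 _ hma
        have h4 : maxLoop as a ≤ m.1 := hmax _ (List.mem_cons_of_mem _ h)
        omega
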